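-- pv_equiv track=rewrite | github.com/sqmw/algorithm-leetcode | main.py | sum_of_modes
-- ===== SOURCE A (Python) =====
-- from typing import List
--
-- def sum_of_modes(arr: List[int]):
--     count_1 = [0] * (len(arr) + 1)
--     count_2 = [0] * (len(arr) + 1)
--
--     for i in range(1, len(arr) + 1):
--         count_1[i] = count_1[i - 1] + (1 if arr[i - 1] == 1 else 0)
--         count_2[i] = count_2[i - 1] + (1 if arr[i - 1] == 2 else 0)
--
--     sum_modes = 0
--     for start in range(len(arr)):
--         for end in range(start + 1, len(arr) + 1):
--             ones = count_1[end] - count_1[start]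
--             twos = count_2[end] - count_2[start]
--             if ones >= twos:
--                 sum_modes += 1
--             else:
--                 sum_modes += 2
--
--     return sum_modes
-- ===== SOURCE B (Python) =====
-- from typing import List
--
-- def sum_of_modes(arr: List[int]):
--     # O(n): every subarray contributes at least 1; add 1 more for each pair of
--     # prefix-diff values P_s < P_e (strictly more 2s than 1s).  Since the prefix
--     # diff moves by +/-1 or 0, the "how many earlier prefixes are below me"
--     # counter is maintained incrementally with a value-count dictionary.
--     n = len(arr)
--     cnt = {0: 1}   # multiplicities of prefix-diff values seen so far
--     cur = 0        # current prefix diff: (#2s) - (#1s)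
--     less = 0       # earlier prefixes strictly below cur
--     extra = 0      # pairs (s, e), s < e, with P_s < P_e
--     for x in arr:
--         if x == 2:
--             less += cnt.get(cur, 0)
--             cur += 1
--         elif x == 1:
--             cur -= 1
--             less -= cnt.get(cur, 0)
--         extra += less
--         cnt[cur] = cnt.get(cur, 0) + 1
--     return n * (n + 1) // 2 + extra
-- ===== Notes on version B (the rewrite author's own statement) =====
-- stated objective: faster
-- what changed: Replaces A's O(n^2) scan over all (start,end) pairs of precomputed count arrays by a single O(n) pass that maintains the prefix diff (#2s - #1s), a dictionary of prefix-value multiplicities and an incrementally-updated count of earlier prefixes strictly below the current one (the diff moves by at most 1 per step), adding n(n+1)/2 for the base contribution of 1 per subarray.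
import Mathlib
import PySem

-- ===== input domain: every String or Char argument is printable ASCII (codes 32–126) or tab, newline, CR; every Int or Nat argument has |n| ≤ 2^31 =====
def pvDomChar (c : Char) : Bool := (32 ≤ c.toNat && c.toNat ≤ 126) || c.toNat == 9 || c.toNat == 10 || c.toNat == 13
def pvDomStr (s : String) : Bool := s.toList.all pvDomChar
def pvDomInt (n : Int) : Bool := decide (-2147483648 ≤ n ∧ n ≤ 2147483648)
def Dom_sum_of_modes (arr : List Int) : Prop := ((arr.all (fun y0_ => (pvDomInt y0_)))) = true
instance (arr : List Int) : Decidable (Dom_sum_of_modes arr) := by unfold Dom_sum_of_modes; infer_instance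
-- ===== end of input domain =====

-- B replaces A's quadratic pair scan by one linear pass that counts, per position, the earlier
-- prefix diffs strictly below the current one (objective: faster, asymptotically).

-- ===== PORT A =====
-- literal transliteration of A: two prefix-count arrays built by index assignment
-- (indices i, i-1, start, end are produced by range(), hence in range: pySetD/pyGetD are exact),
-- then a double loop over all (start, end) pairs.
def sum_of_modes (arr : List Int) : Int :=
  let count_1 : List Int := List.replicate (arr.length + 1) 0
  let count_2 : List Int := List.replicate (arr.length + 1) 0
  let c := (PySem.List.pyRange 1 ((arr.length : Int) + 1)).foldl
    (fun (c : List Int × List Int) i =>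
      (PySem.List.pySetD c.1 i
         (PySem.List.pyGetD c.1 (i - 1) 0 + (if PySem.List.pyGetD arr (i - 1) 0 = 1 then 1 else 0)),
       PySem.List.pySetD c.2 i
         (PySem.List.pyGetD c.2 (i - 1) 0 + (if PySem.List.pyGetD arr (i - 1) 0 = 2 then 1 else 0))))
    (count_1, count_2)
  (PySem.List.pyRange 0 (arr.length : Int)).foldl
    (fun sum_modes start =>
      (PySem.List.pyRange (start + 1) ((arr.length : Int) + 1)).foldl
        (fun sum_modes end_ =>
          let ones := PySem.List.pyGetD c.1 end_ 0 - PySem.List.pyGetD c.1 start 0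
          let twos := PySem.List.pyGetD c.2 end_ 0 - PySem.List.pyGetD c.2 start 0
          if ones ≥ twos then sum_modes + 1 else sum_modes + 2)
        sum_modes)
    0

-- ===== PORT B =====
-- literal transliteration of Source B: state (cnt, cur, less, extra); per element the pair
-- (cur, less) is updated as in the if/elif, then extra += less and cnt[cur] += 1.
def sum_of_modes_alt (arr : List Int) : Int :=
  let st := arr.foldl
    (fun (st : PySem.Dict Int Int × Int × Int × Int) x =>
      let cnt := st.1
      let p :=
        if x = 2 then (st.2.1 + 1, st.2.2.1 + cnt.getD st.2.1 0)
        else if x = 1 then (st.2.1 - 1, st.2.2.1 - cnt.getD (st.2.1 - 1) 0)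
        else (st.2.1, st.2.2.1)
      (cnt.insert p.1 (cnt.getD p.1 0 + 1), p.1, p.2, st.2.2.2 + p.2))
    (PySem.Dict.ofList [((0 : Int), (1 : Int))], 0, 0, 0)
  PySem.Int.floordiv ((arr.length : Int) * ((arr.length : Int) + 1)) 2 + st.2.2.2

-- ===== PRECONDITION & SPEC =====
def Spec_sum_of_modes (arr : List Int) (out : Int) : Prop := out = sum_of_modes_alt arr
instance (arr : List Int) (out : Int) : Decidable (Spec_sum_of_modes arr out) := by unfold Spec_sum_of_modes; infer_instance

-- ===== CLAIM (what is proved, stated in full; the proofs are below) =====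
def Claim_equal_sum_of_modes : Prop := ∀ (arr : List Int), Dom_sum_of_modes arr → Spec_sum_of_modes arr (sum_of_modes arr)

-- ===== LEMMAS AND PROOFS =====

-- the per-element prefix-diff step: +1 for a 2, -1 for a 1, 0 otherwise
def dstep (x : Int) : Int := if x = 2 then 1 else if x = 1 then -1 else 0
-- prefix diff of a whole list, and of the k-th prefix of arr
def pfl (l : List Int) : Int := (l.map dstep).sum
def pf (arr : List Int) (k : Nat) : Int := pfl (arr.take k)
-- indicator of a strict rise between prefixes s and e
def indi (arr : List Int) (s e : Nat) : Int := if pf arr s < pf arr e then 1 else 0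
-- A's prefix counts of 1s and 2s
def o1 (arr : List Int) (k : Nat) : Int := ((arr.take k).count 1 : Int)
def o2 (arr : List Int) (k : Nat) : Int := ((arr.take k).count 2 : Int)
-- all prefix diffs of l (including the full one), and the same without the full one
def prefs (l : List Int) : List Int := (List.range (l.length + 1)).map (fun k => pfl (l.take k))
def qs (l : List Int) : List Int := (List.range l.length).map (fun k => pfl (l.take k))
-- number of proper prefixes of l whose diff is strictly below the full diff
def cl (l : List Int) : Int := ((qs l).countP (fun p => decide (p < pfl l)) : Int)
-- total rise-pair count contributed while consuming r after l
def Eseg : List Int → List Int → Int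
  | _, [] => 0
  | l, x :: r => cl (l ++ [x]) + Eseg (l ++ [x]) r
-- B's loop step, as the (zeta-reduced) body of sum_of_modes_alt's fold
def stepB (st : PySem.Dict Int Int × Int × Int × Int) (x : Int) : PySem.Dict Int Int × Int × Int × Int :=
  let cnt := st.1
  let p :=
    if x = 2 then (st.2.1 + 1, st.2.2.1 + cnt.getD st.2.1 0)
    else if x = 1 then (st.2.1 - 1, st.2.2.1 - cnt.getD (st.2.1 - 1) 0)
    else (st.2.1, st.2.2.1)
  (cnt.insert p.1 (cnt.getD p.1 0 + 1), p.1, p.2, st.2.2.2 + p.2)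

theorem pfl_append_singleton (l : List Int) (x : Int) : pfl (l ++ [x]) = pfl l + dstep x := by
  simp [pfl]

theorem pfl_eq_counts (l : List Int) : pfl l = (l.count 2 : Int) - (l.count 1 : Int) := by
  induction l with
  | nil => simp [pfl]
  | cons x l ih =>
    simp only [pfl, List.map_cons, List.sum_cons, List.count_cons] at *
    rw [ih] ; simp [dstep] ; split_ifs <;> omega

theorem countP_lt_succ (xs : List Int) (c : Int) :
    xs.countP (fun p => decide (p < c + 1)) = xs.countP (fun p => decide (p < c)) + xs.count c := by
  induction xs with
  | nil => simp
  | cons x xs ih =>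
    simp only [List.countP_cons, List.count_cons, ih, beq_iff_eq, decide_eq_true_eq]
    split_ifs <;> omega

theorem prefs_append (l : List Int) (x : Int) : prefs (l ++ [x]) = prefs l ++ [pfl (l ++ [x])] := by
  simp only [prefs, List.length_append, List.length_singleton]
  rw [show l.length + 1 + 1 = (l.length + 1) + 1 from rfl, List.range_succ, List.map_append]
  congr 1
  · apply List.map_congr_left; intro k hk
    rw [List.take_append_of_le_length (by simpa using Nat.lt_succ_iff.mp (List.mem_range.mp hk))]
  · simp [List.take_of_length_le (by simp : (l ++ [x]).length ≤ l.length + 1)]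

theorem qs_append (l : List Int) (x : Int) : qs (l ++ [x]) = prefs l := by
  simp only [qs, prefs, List.length_append, List.length_singleton]
  apply List.map_congr_left; intro k hk
  rw [List.take_append_of_le_length (by simpa using Nat.lt_succ_iff.mp (List.mem_range.mp hk))]

theorem prefs_eq_qs_append (l : List Int) : prefs l = qs l ++ [pfl l] := by
  simp only [prefs, qs, List.range_succ, List.map_append]
  simp

theorem countP_prefs_eq (l : List Int) :
    (prefs l).countP (fun p => decide (p < pfl l)) = (qs l).countP (fun p => decide (p < pfl l)) := by
  rw [prefs_eq_qs_append, List.countP_append]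
  simp

theorem cl_append (l : List Int) (x : Int) :
    cl (l ++ [x]) = (((prefs l).countP (fun p => decide (p < pfl l + dstep x)) : Nat) : Int) := by
  rw [cl, qs_append, pfl_append_singleton]

theorem cl_append_two (l : List Int) : cl (l ++ [(2 : Int)]) = cl l + ((prefs l).count (pfl l) : Int) := by
  rw [cl_append, cl]
  have h : dstep 2 = 1 := rfl
  rw [h, countP_lt_succ, countP_prefs_eq]
  push_cast; ring

theorem cl_append_one (l : List Int) : cl (l ++ [(1 : Int)]) = cl l - ((prefs l).count (pfl l - 1) : Int) := by
  rw [cl_append, cl]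
  have h : dstep 1 = -1 := rfl
  have h2 := countP_lt_succ (prefs l) (pfl l - 1)
  rw [sub_add_cancel] at h2
  rw [countP_prefs_eq] at h2
  have h3 : pfl l + dstep 1 = pfl l - 1 := by rw [h]; ring
  rw [h3]
  omega

theorem cl_append_other (l : List Int) (x : Int) (h2 : x ≠ 2) (h1 : x ≠ 1) : cl (l ++ [x]) = cl l := by
  rw [cl_append, cl]
  have h : dstep x = 0 := by simp [dstep, h1, h2]
  rw [h, add_zero, countP_prefs_eq]

theorem cnt_invariant (l : List Int) (x : Int) (cnt : PySem.Dict Int Int)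
    (h : ∀ v, cnt.getD v 0 = ((prefs l).count v : Int)) (C : Int) (hC : C = pfl (l ++ [x])) :
    ∀ v, (cnt.insert C (cnt.getD C 0 + 1)).getD v 0 = ((prefs (l ++ [x])).count v : Int) := by
  intro v
  rw [PySem.Dict.getD_insert, prefs_append, List.count_append, hC]
  by_cases hv : v = pfl (l ++ [x])
  · simp [hv, h]
  · simp [hv, h]
    simpa [List.count_eq_zero] using hv

theorem stepB_two (cnt : PySem.Dict Int Int) (cur less extra : Int) :
    stepB (cnt, cur, less, extra) 2 =
      (cnt.insert (cur + 1) (cnt.getD (cur + 1) 0 + 1), cur + 1, less + cnt.getD cur 0,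
        extra + (less + cnt.getD cur 0)) := by
  norm_num [stepB]

theorem stepB_one (cnt : PySem.Dict Int Int) (cur less extra : Int) :
    stepB (cnt, cur, less, extra) 1 =
      (cnt.insert (cur - 1) (cnt.getD (cur - 1) 0 + 1), cur - 1, less - cnt.getD (cur - 1) 0,
        extra + (less - cnt.getD (cur - 1) 0)) := by
  norm_num [stepB]

theorem stepB_other (cnt : PySem.Dict Int Int) (cur less extra x : Int) (hx2 : x ≠ 2) (hx1 : x ≠ 1) :
    stepB (cnt, cur, less, extra) x =
      (cnt.insert cur (cnt.getD cur 0 + 1), cur, less, extra + less) := by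
  simp [stepB, hx1, hx2]

theorem loopB (r : List Int) : ∀ (l : List Int) (cnt : PySem.Dict Int Int) (cur less extra : Int),
    (∀ v, cnt.getD v 0 = ((prefs l).count v : Int)) →
    cur = pfl l → less = cl l →
    (r.foldl stepB (cnt, cur, less, extra)).2.2.2 = extra + Eseg l r := by
  induction r with
  | nil => intros; simp [Eseg]
  | cons x r ih =>
    intro l cnt cur less extra hcnt hcur hless
    simp only [List.foldl_cons]
    by_cases hx2 : x = 2
    · subst hx2; subst hcur; subst hless
      have hC : pfl l + 1 = pfl (l ++ [(2:Int)]) := by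
        rw [pfl_append_singleton]; rfl
      have hcnt' := cnt_invariant l 2 cnt hcnt (pfl l + 1) hC
      have hless' : cl l + cnt.getD (pfl l) 0 = cl (l ++ [(2:Int)]) := by
        rw [cl_append_two, hcnt]
      rw [stepB_two, ih (l ++ [2]) _ _ _ _ hcnt' hC hless']
      simp [Eseg, ← hless']
      ring
    · by_cases hx1 : x = 1
      · subst hx1; subst hcur; subst hless
        have hC : pfl l - 1 = pfl (l ++ [(1:Int)]) := by
          rw [pfl_append_singleton]; rfl
        have hcnt' := cnt_invariant l 1 cnt hcnt (pfl l - 1) hC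
        have hless' : cl l - cnt.getD (pfl l - 1) 0 = cl (l ++ [(1:Int)]) := by
          rw [cl_append_one, hcnt]
        rw [stepB_one, ih (l ++ [1]) _ _ _ _ hcnt' hC hless']
        simp [Eseg, ← hless']
        ring
      · subst hcur; subst hless
        have hC : pfl l = pfl (l ++ [x]) := by
          rw [pfl_append_singleton, show dstep x = 0 by simp [dstep, hx1, hx2], add_zero]
        have hcnt' := cnt_invariant l x cnt hcnt (pfl l) hC
        have hless' : cl l = cl (l ++ [x]) := (cl_append_other l x hx2 hx1).symm
        rw [stepB_other _ _ _ _ _ hx2 hx1, ih (l ++ [x]) _ _ _ _ hcnt' hC hless']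
        simp [Eseg, ← hless']
        ring

theorem Eseg_eq (r : List Int) : ∀ l : List Int,
    Eseg l r = ((List.range r.length).map (fun j => cl (l ++ r.take (j + 1)))).sum := by
  induction r with
  | nil => intro l; simp [Eseg]
  | cons x r ih =>
    intro l
    rw [show (x :: r).length = r.length + 1 from rfl, List.range_succ_eq_map]
    simp only [List.map_cons, List.sum_cons, List.map_map, Eseg, ih (l ++ [x])]
    congr 1
    apply congrArg List.sum
    apply List.map_congr_left
    intro j _
    simp [Function.comp_apply, List.append_assoc]

theorem cl_take (arr : List Int) (j : Nat) (hj : j < arr.length) :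
    cl (arr.take (j + 1)) = ((List.range (j + 1)).map (fun s => indi arr s (j + 1))).sum := by
  have hlen : (arr.take (j + 1)).length = j + 1 := by rw [List.length_take]; omega
  have h1 : qs (arr.take (j + 1)) = (List.range (j + 1)).map (fun k => pf arr k) := by
    rw [qs, hlen]
    apply List.map_congr_left
    intro k hk
    have hk' : k < j + 1 := List.mem_range.mp hk
    rw [List.take_take, min_eq_left (by omega : k ≤ j + 1)]
    rfl
  have h2 : pfl (arr.take (j + 1)) = pf arr (j + 1) := rfl
  rw [cl, h1, h2, List.countP_map]
  rw [show ((List.range (j + 1)).map (fun s => indi arr s (j + 1))).sum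
        = ((List.range (j + 1)).map (fun s => if (fun s => decide (pf arr s < pf arr (j + 1))) s = true then (1:Int) else 0)).sum by
      congr 1; apply List.map_congr_left; intro s _; simp [indi]]
  rw [PySem.List.sum_map_ite_one_zero]
  rfl

theorem cnt0 : ∀ v : Int, (PySem.Dict.ofList [((0 : Int), (1 : Int))]).getD v 0 = ((prefs ([] : List Int)).count v : Int) := by
  intro v
  have h : prefs ([] : List Int) = [0] := by
    simp [prefs, pfl, List.range_succ]
  have hd : PySem.Dict.ofList [((0 : Int), (1 : Int))] = PySem.Dict.mk [((0 : Int), (1 : Int))] := by decide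
  rw [h, hd, PySem.Dict.getD_eq_get?_getD, PySem.Dict.get?_mk_cons]
  by_cases hv : v = 0
  · simp [hv]
  · rw [if_neg (by simpa using fun hh => hv (Eq.symm hh)),
      show ({ items := [] } : PySem.Dict Int Int).get? v = none from rfl,
      List.count_eq_zero_of_not_mem (by simpa using hv)]
    rfl

theorem B_char (arr : List Int) :
    sum_of_modes_alt arr =
      PySem.Int.floordiv ((arr.length : Int) * ((arr.length : Int) + 1)) 2 +
        ((List.range arr.length).map (fun j => ((List.range (j + 1)).map (fun s => indi arr s (j + 1))).sum)).sum := by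
  have h0 : sum_of_modes_alt arr =
      PySem.Int.floordiv ((arr.length : Int) * ((arr.length : Int) + 1)) 2 +
        (arr.foldl stepB (PySem.Dict.ofList [((0 : Int), (1 : Int))], 0, 0, 0)).2.2.2 := rfl
  rw [h0, loopB arr [] _ 0 0 0 cnt0 (by simp [pfl]) (by simp [cl, qs])]
  rw [Eseg_eq, zero_add]
  congr 1
  apply congrArg List.sum
  apply List.map_congr_left
  intro j hj
  rw [List.nil_append, cl_take arr j (List.mem_range.mp hj)]

-- generic double-sum reindexing: group the pairs s < e ≤ n by s (LHS) or by e (RHS)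
theorem swapSum (F : Nat → Nat → Int) : ∀ n : Nat,
    ((List.range n).map (fun s => ((List.range (n - s)).map (fun j => F s (s + 1 + j))).sum)).sum =
      ((List.range n).map (fun j => ((List.range (j + 1)).map (fun s => F s (j + 1))).sum)).sum := by
  intro n
  induction n with
  | zero => simp
  | succ n ih =>
    rw [List.range_succ, List.map_append, List.sum_append, List.map_append, List.sum_append]
    have hlast : (([n].map (fun s => ((List.range (n + 1 - s)).map (fun j => F s (s + 1 + j))).sum)).sum) = F n (n + 1) := by
      simp [List.range_succ]
    have hmain : ((List.range n).map (fun s => ((List.range (n + 1 - s)).map (fun j => F s (s + 1 + j))).sum)).sum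
        = ((List.range n).map (fun s => ((List.range (n - s)).map (fun j => F s (s + 1 + j))).sum + F s (n + 1))).sum := by
      congr 1
      apply List.map_congr_left
      intro s hs
      have hs' : s < n := List.mem_range.mp hs
      rw [show n + 1 - s = (n - s) + 1 by omega, List.range_succ, List.map_append, List.sum_append]
      simp [show s + 1 + (n - s) = n + 1 by omega]
    rw [hlast, hmain, PySem.List.sum_map_add_int, ih]
    rw [show ([n].map (fun j => ((List.range (j + 1)).map (fun s => F s (j + 1))).sum)).sum
          = ((List.range (n + 1)).map (fun s => F s (n + 1))).sum by simp]
    rw [List.range_succ, List.map_append, List.sum_append]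
    simp
    ring

theorem gauss_aux (n : Nat) : 2 * ((List.range n).map (fun k : Nat => ((k : Int) + 1))).sum = (n : Int) * ((n : Int) + 1) := by
  induction n with
  | zero => norm_num
  | succ n ih =>
    rw [List.range_succ, List.map_append, List.sum_append]
    simp only [List.map_cons, List.map_nil, List.sum_cons, List.sum_nil]
    push_cast
    ring_nf
    ring_nf at ih
    linarith

theorem gauss_rev (n : Nat) :
    (List.range n).map (fun s : Nat => ((n - s : Nat) : Int)) = ((List.range n).map (fun k : Nat => ((k : Int) + 1))).reverse := by
  apply List.ext_getElem
  · simp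
  · intro i h1 h2
    simp only [List.length_map, List.length_range] at h1
    rw [List.getElem_reverse]
    simp only [List.getElem_map, List.getElem_range, List.length_map, List.length_range]
    omega

theorem gaussN (n : Nat) :
    ((List.range n).map (fun s : Nat => ((n - s : Nat) : Int))).sum =
      PySem.Int.floordiv ((n : Int) * ((n : Int) + 1)) 2 := by
  rw [gauss_rev, List.sum_reverse, ← gauss_aux, PySem.Int.floordiv_eq_ediv_of_pos (by omega)]
  omega

theorem pySetD_map_range (f : Nat → Int) (N j : Nat) (hj : j < N) (v : Int) :
    PySem.List.pySetD ((List.range N).map f) (j : Int) v =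
      (List.range N).map (fun k => if k = j then v else f k) := by
  have h : j < ((List.range N).map f).length := by simpa using hj
  rw [show PySem.List.pySetD ((List.range N).map f) (j : Int) v = ((List.range N).map f).set j v by
        simp [PySem.List.pySetD, PySem.List.pySet?, PySem.List.pyIdx?, hj]]
  apply List.ext_getElem
  · simp
  · intro i h1 h2
    simp only [List.getElem_set, List.getElem_map, List.getElem_range]
    simp only [List.length_set, List.length_map, List.length_range] at h1
    split_ifs with e1 e2 e2 <;> first | rfl | omega

theorem count_take_succ (arr : List Int) (t : Int) (m : Nat) (h : m < arr.length) :
    ((arr.take (m + 1)).count t : Int) = ((arr.take m).count t : Int) + (if arr.getD m 0 = t then 1 else 0) := by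
  rw [List.take_add_one, List.getElem?_eq_getElem h]
  simp only [Option.toList_some, List.count_append, List.count_cons, List.count_nil]
  rw [List.getD_eq_getElem arr 0 h]
  by_cases ht : arr[m] = t
  · simp [ht]
  · simp [ht]

theorem map_ite_zero_eq_replicate (N : Nat) (f : Nat → Int) (hf : f 0 = 0) :
    (List.range N).map (fun k => if k ≤ 0 then f k else 0) = List.replicate N 0 := by
  have h : (fun k : Nat => if k ≤ 0 then f k else 0) = fun _ => (0 : Int) := by
    funext k
    rcases Nat.eq_zero_or_pos k with h | h
    · subst h; simpa using hf
    · rw [if_neg (by omega)]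
  rw [h]
  simp [List.map_const']

-- A's first loop builds exactly the prefix-count tables
theorem loop1 (arr : List Int) : ∀ m : Nat, m ≤ arr.length →
    ((PySem.List.pyRange 1 ((m : Int) + 1)).foldl
      (fun (c : List Int × List Int) i =>
        (PySem.List.pySetD c.1 i
           (PySem.List.pyGetD c.1 (i - 1) 0 + (if PySem.List.pyGetD arr (i - 1) 0 = 1 then 1 else 0)),
         PySem.List.pySetD c.2 i
           (PySem.List.pyGetD c.2 (i - 1) 0 + (if PySem.List.pyGetD arr (i - 1) 0 = 2 then 1 else 0))))
      (List.replicate (arr.length + 1) 0, List.replicate (arr.length + 1) 0)) =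
    ((List.range (arr.length + 1)).map (fun k => if k ≤ m then o1 arr k else 0),
     (List.range (arr.length + 1)).map (fun k => if k ≤ m then o2 arr k else 0)) := by
  intro m
  induction m with
  | zero =>
    intro _
    rw [show ((0 : Nat) : Int) + 1 = 1 by norm_num, PySem.List.pyRange_one_eq_nil (le_refl 1)]
    rw [List.foldl_nil]
    rw [map_ite_zero_eq_replicate _ _ (by simp [o1]), map_ite_zero_eq_replicate _ _ (by simp [o2])]
  | succ m ih =>
    intro hm
    have hm' : m ≤ arr.length := by omega
    rw [show ((m + 1 : Nat) : Int) + 1 = ((m : Int) + 1) + 1 by push_cast; ring]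
    rw [PySem.List.pyRange_one_succ_right (by omega : (1:Int) ≤ (m : Int) + 1)]
    rw [List.foldl_append, ih hm', List.foldl_cons, List.foldl_nil]
    have hidx : ((m : Int) + 1) - 1 = ((m : Nat) : Int) := by ring
    have hget1 : PySem.List.pyGetD ((List.range (arr.length + 1)).map (fun k => if k ≤ m then o1 arr k else 0)) (((m : Int) + 1) - 1) 0 = o1 arr m := by
      rw [hidx, PySem.List.pyGetD_natCast, PySem.List.getD_map_range _ _ _ _ (by omega)]
      simp
    have hget2 : PySem.List.pyGetD ((List.range (arr.length + 1)).map (fun k => if k ≤ m then o2 arr k else 0)) (((m : Int) + 1) - 1) 0 = o2 arr m := by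
      rw [hidx, PySem.List.pyGetD_natCast, PySem.List.getD_map_range _ _ _ _ (by omega)]
      simp
    have hgetarr : PySem.List.pyGetD arr (((m : Int) + 1) - 1) 0 = arr.getD m 0 := by
      rw [hidx, PySem.List.pyGetD_natCast]
    simp only [hget1, hget2, hgetarr]
    rw [show ((m : Int) + 1) = (((m + 1 : Nat)) : Int) by push_cast; ring]
    rw [pySetD_map_range _ _ _ (by omega) _, pySetD_map_range _ _ _ (by omega) _]
    have h1 : o1 arr (m + 1) = o1 arr m + (if arr.getD m 0 = 1 then 1 else 0) :=
      count_take_succ arr 1 m (by omega)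
    have h2 : o2 arr (m + 1) = o2 arr m + (if arr.getD m 0 = 2 then 1 else 0) :=
      count_take_succ arr 2 m (by omega)
    refine Prod.ext ?_ ?_ <;> dsimp only <;> apply List.map_congr_left <;> intro k _
    · by_cases hk : k = m + 1
      · subst hk
        rw [if_pos rfl, if_pos (le_refl _), ← h1]
      · rw [if_neg hk]
        split_ifs with c1 c2 c2 <;> first | rfl | omega
    · by_cases hk : k = m + 1
      · subst hk
        rw [if_pos rfl, if_pos (le_refl _), ← h2]
      · rw [if_neg hk]
        split_ifs with c1 c2 c2 <;> first | rfl | omega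

theorem body_eq (arr : List Int) (s e : Nat) (sm : Int) :
    (if o1 arr e - o1 arr s ≥ o2 arr e - o2 arr s then sm + 1 else sm + 2) = sm + (1 + indi arr s e) := by
  have hs : pf arr s = o2 arr s - o1 arr s := by rw [pf, pfl_eq_counts]; rfl
  have he : pf arr e = o2 arr e - o1 arr e := by rw [pf, pfl_eq_counts]; rfl
  unfold indi
  split_ifs with h1 h2 h2 <;> omega

theorem A_char (arr : List Int) :
    sum_of_modes arr =
      ((List.range arr.length).map (fun s => ((arr.length - s : Nat) : Int))).sum +
        ((List.range arr.length).map
          (fun s => ((List.range (arr.length - s)).map (fun j => indi arr s (s + 1 + j))).sum)).sum := by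
  simp only [sum_of_modes]
  rw [loop1 arr arr.length (le_refl _)]
  have hv1 : (List.range (arr.length + 1)).map (fun k => if k ≤ arr.length then o1 arr k else 0)
      = (List.range (arr.length + 1)).map (fun k => o1 arr k) := by
    apply List.map_congr_left; intro k hk
    rw [if_pos (by have := List.mem_range.mp hk; omega)]
  have hv2 : (List.range (arr.length + 1)).map (fun k => if k ≤ arr.length then o2 arr k else 0)
      = (List.range (arr.length + 1)).map (fun k => o2 arr k) := by
    apply List.map_congr_left; intro k hk
    rw [if_pos (by have := List.mem_range.mp hk; omega)]
  rw [hv1, hv2]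
  rw [PySem.List.pyRange_one 0 (arr.length : Int)]
  simp only [sub_zero, Int.toNat_natCast]
  rw [List.foldl_map]
  rw [PySem.List.foldl_congr_mem (List.range arr.length) _
      (fun x y => x + (((arr.length - y : Nat) : Int) +
        ((List.range (arr.length - y)).map (fun j => indi arr y (y + 1 + j))).sum)) 0 ?hbody]
  case hbody =>
    intro acc y hy
    have hy' : y < arr.length := List.mem_range.mp hy
    simp only [zero_add]
    rw [PySem.List.pyRange_one ((y : Int) + 1) ((arr.length : Int) + 1)]
    rw [show (((arr.length : Int) + 1) - ((y : Int) + 1)).toNat = arr.length - y by omega]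
    rw [List.foldl_map]
    rw [PySem.List.foldl_congr_mem (List.range (arr.length - y)) _
        (fun sm j => sm + (1 + indi arr y (y + 1 + j))) acc ?hinner]
    case hinner =>
      intro sm j hj
      have hj' : j < arr.length - y := List.mem_range.mp hj
      rw [show (y : Int) + 1 + (j : Int) = ((y + 1 + j : Nat) : Int) by push_cast; ring]
      rw [PySem.List.pyGetD_natCast, PySem.List.pyGetD_natCast, PySem.List.pyGetD_natCast,
        PySem.List.pyGetD_natCast]
      rw [PySem.List.getD_map_range (fun k => o1 arr k) (arr.length + 1) (y + 1 + j) 0 (by omega),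
        PySem.List.getD_map_range (fun k => o1 arr k) (arr.length + 1) y 0 (by omega),
        PySem.List.getD_map_range (fun k => o2 arr k) (arr.length + 1) (y + 1 + j) 0 (by omega),
        PySem.List.getD_map_range (fun k => o2 arr k) (arr.length + 1) y 0 (by omega)]
      exact body_eq arr y (y + 1 + j) sm
    rw [PySem.List.foldl_add (List.range (arr.length - y)) (fun j => 1 + indi arr y (y + 1 + j)) acc]
    rw [PySem.List.sum_map_add_int (List.range (arr.length - y)) (fun _ => 1) (fun j => indi arr y (y + 1 + j))]
    rw [PySem.List.sum_map_const_int]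
    simp only [List.length_range, mul_one]
  rw [PySem.List.foldl_add (List.range arr.length)
      (fun y => ((arr.length - y : Nat) : Int) +
        ((List.range (arr.length - y)).map (fun j => indi arr y (y + 1 + j))).sum) 0]
  rw [zero_add, PySem.List.sum_map_add_int]

-- ===== VERDICT (by name: the statement is the Claim_ definition above) =====
theorem sum_of_modes_spec : Claim_equal_sum_of_modes := by
  intro arr _
  unfold Spec_sum_of_modes
  rw [A_char, B_char, gaussN, swapSum]
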